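-- pv_equiv track=rewrite | github.com/microsoft/knossos-ksc | src/python/ksc/translate.py | handle_let
-- ===== SOURCE A (Python) =====
-- def handle_let(let_var_names, let_exprs, body, indent=4):
--     joiner = ("\n" + (" " * indent))
--     let_var = let_var_names[-1]
--     let_expr = let_exprs[-1]
--     lambda_expr = joiner.join([
--         f"let(var={let_expr},",
--         f"    body=lambda {let_var}:",
--         f"      {body}",
--         ")"
--     ])
--     if len(let_var_names) > 1:
--         return handle_let(let_var_names[:-1],
--                               let_exprs[:-1],
--                               lambda_expr,
--                               indent=indent-2)
--     else:
--         return lambda_expr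
-- ===== SOURCE B (Python) =====
-- def handle_let(let_var_names, let_exprs, body, indent=4):
--     result = body
--     ind = indent
--     for var, expr in zip(reversed(let_var_names), reversed(let_exprs)):
--         joiner = "\n" + " " * ind
--         result = joiner.join([
--             f"let(var={expr},",
--             f"    body=lambda {var}:",
--             f"      {result}",
--             ")"
--         ])
--         ind -= 2
--     return result
-- ===== Notes on version B (the rewrite author's own statement) =====
-- stated objective: simpler
-- what changed: Replaced A's slice-and-recurse tail recursion (rebuilding both list prefixes at every level) with a single foldl over zip(reversed(names), reversed(exprs)) carrying a (result, indent) accumulator.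
-- outside the precondition, e.g. on handle_let([], [], 'b', 4): A raises IndexError, B returns 'b'
import Mathlib
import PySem

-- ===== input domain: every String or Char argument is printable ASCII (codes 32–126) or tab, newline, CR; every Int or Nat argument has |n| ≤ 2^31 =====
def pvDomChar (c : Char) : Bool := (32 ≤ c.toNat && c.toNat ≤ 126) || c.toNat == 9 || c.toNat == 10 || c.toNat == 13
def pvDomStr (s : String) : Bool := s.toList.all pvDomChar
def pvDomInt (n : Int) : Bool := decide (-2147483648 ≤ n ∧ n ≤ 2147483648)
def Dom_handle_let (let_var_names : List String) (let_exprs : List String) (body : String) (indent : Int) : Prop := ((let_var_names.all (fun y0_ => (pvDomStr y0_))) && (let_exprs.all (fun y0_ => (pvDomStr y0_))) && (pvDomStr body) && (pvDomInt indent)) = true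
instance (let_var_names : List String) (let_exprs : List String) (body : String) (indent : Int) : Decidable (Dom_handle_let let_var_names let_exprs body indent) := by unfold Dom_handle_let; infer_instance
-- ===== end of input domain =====

-- B replaces A's slice-and-recurse with a single fold over the reversed zip of the two lists (simpler decomposition, same cost).
-- Pre_ excludes the inputs on which A raises IndexError (empty let_var_names, or let_exprs shorter than let_var_names).


-- ===== PORT A =====
def handle_let (let_var_names : List String) (let_exprs : List String) (body : String) (indent : Int) : String :=
  let joiner : String := "\n" ++ String.ofList (PySem.List.pyRepeat [' '] indent)
  let letV : String := (PySem.List.pyGet? let_var_names (-1)).getD ""    -- none = IndexError, excluded by Pre_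
  let letE : String := (PySem.List.pyGet? let_exprs (-1)).getD ""      -- none = IndexError, excluded by Pre_
  let lambda_expr : String := PySem.Str.join joiner
      ["let(var=" ++ letE ++ ",",
       "    body=lambda " ++ letV ++ ":",
       "      " ++ body,
       ")"]
  if h : 1 < let_var_names.length then
    handle_let (PySem.List.slice let_var_names none (some (-1)))
               (PySem.List.slice let_exprs none (some (-1)))
               lambda_expr (indent - 2)
  else
    lambda_expr
termination_by let_var_names.length
decreasing_by simp [PySem.List.slice_to_neg_one]; omega

-- ===== PORT B =====
def handle_let_alt (let_var_names : List String) (let_exprs : List String) (body : String) (indent : Int) : String :=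
  ((let_var_names.reverse.zip let_exprs.reverse).foldl
    (fun (st : String × Int) ve =>
      (PySem.Str.join ("\n" ++ String.ofList (PySem.List.pyRepeat [' '] st.2))
        ["let(var=" ++ ve.2 ++ ",",
         "    body=lambda " ++ ve.1 ++ ":",
         "      " ++ st.1,
         ")"],
       st.2 - 2))
    (body, indent)).1

-- ===== PRECONDITION & SPEC =====
-- Pre_ excludes exactly the inputs where A raises IndexError: an empty let_var_names,
-- or let_exprs shorter than let_var_names (the recursion exhausts let_exprs first).
def Pre_handle_let (let_var_names : List String) (let_exprs : List String) (body : String) (indent : Int) : Prop :=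
  1 ≤ let_var_names.length ∧ let_var_names.length ≤ let_exprs.length
instance (let_var_names : List String) (let_exprs : List String) (body : String) (indent : Int) : Decidable (Pre_handle_let let_var_names let_exprs body indent) := by unfold Pre_handle_let; infer_instance

def pvWitness_handle_let : List String × List String × String × Int := (["x", "y"], ["1", "2"], "x + y", 4)

def Spec_handle_let (let_var_names : List String) (let_exprs : List String) (body : String) (indent : Int) (out : String) : Prop := out = handle_let_alt let_var_names let_exprs body indent
instance (let_var_names : List String) (let_exprs : List String) (body : String) (indent : Int) (out : String) : Decidable (Spec_handle_let let_var_names let_exprs body indent out) := by unfold Spec_handle_let; infer_instance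

-- ===== CLAIM (what is proved, stated in full; the proofs are below) =====
def Claim_equal_handle_let : Prop := ∀ (let_var_names : List String) (let_exprs : List String) (body : String) (indent : Int), Dom_handle_let let_var_names let_exprs body indent → Pre_handle_let let_var_names let_exprs body indent → Spec_handle_let let_var_names let_exprs body indent (handle_let let_var_names let_exprs body indent)

-- ===== LEMMAS AND PROOFS =====

theorem handle_let_key : ∀ (names : List String), ∀ (exprs : List String) (body : String) (indent : Int),
    names ≠ [] → names.length ≤ exprs.length →
    handle_let names exprs body indent = handle_let_alt names exprs body indent := by
  intro names
  induction names using List.reverseRecOn with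
  | nil => intro _ _ _ h _; exact absurd rfl h
  | append_singleton ns v ih =>
    intro exprs body indent _ hlen
    obtain ⟨es, e, rfl⟩ : ∃ es e, exprs = es ++ [e] := by
      rcases exprs.eq_nil_or_concat with rfl | ⟨es, e, he⟩
      · simp at hlen
      · exact ⟨es, e, by simp [he]⟩
    rw [handle_let]
    simp only [PySem.List.pyGet?_neg_one_append_singleton, Option.getD_some,
      PySem.List.slice_to_neg_one, List.dropLast_concat]
    by_cases hns : ns = []
    · subst hns
      simp [handle_let_alt]
    · have h1 : 1 < (ns ++ [v]).length := by
        simp; exact List.length_pos_iff.mpr hns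
      rw [dif_pos h1]
      rw [ih es _ (indent - 2) hns (by simpa using hlen)]
      simp [handle_let_alt, List.zip_cons_cons]

-- ===== VERDICT (by name: the statement is the Claim_ definition above) =====
theorem handle_let_spec : Claim_equal_handle_let := by
  intro names exprs body indent _ hpre
  obtain ⟨h1, h2⟩ := hpre
  exact handle_let_key names exprs body indent
    (List.length_pos_iff.mp (by omega)) h2
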